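-- pv_equiv track=rewrite | github.com/Kuriiios/f1_analysis_visualization | notebooks/dashboard.py | background_color_df
-- ===== SOURCE A (Python) =====
-- def background_color_df(s):
--     colors= []
--     for time_and_compound in s:
--         if 'SOFT' in time_and_compound:
--             colors.append('background-color:red')
--         elif 'MEDIUM' in time_and_compound:
--             colors.append('background-color:yellow')
--         elif 'HARD' in time_and_compound:
--             colors.append('background-color:white')
--         elif 'INTERMEDIATE' in time_and_compound:
--             colors.append('background-color:green')
--         elif 'WET' in time_and_compound:
--             colors.append('background-color:blue')
--         elif ' SUPERSOFT' in time_and_compound: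
--             colors.append('background-color:purple')
--         elif ' ULTRASOFT' in time_and_compound:
--             colors.append('background-color:orangered')
--         elif ' HYPERSOFT' in time_and_compound:
--             colors.append('background-color:pink')
--         elif ' SUPERHARD' in time_and_compound:
--             colors.append('background-color:orange')
--         else:
--             colors.append('background-color:grey')
--     return colors
-- ===== SOURCE B (Python) =====
-- def background_color_df(s):
--     # Four of A's nine branches are unreachable: ' SUPERSOFT', ' ULTRASOFT'
--     # and ' HYPERSOFT' all contain 'SOFT', and ' SUPERHARD' contains 'HARD',
--     # so an earlier branch always fires first.  B therefore checks only the
--     # five live keywords, with an early-return helper mapped over s.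
--     def color(e):
--         if 'SOFT' in e:
--             return 'background-color:red'
--         if 'MEDIUM' in e:
--             return 'background-color:yellow'
--         if 'HARD' in e:
--             return 'background-color:white'
--         if 'INTERMEDIATE' in e:
--             return 'background-color:green'
--         if 'WET' in e:
--             return 'background-color:blue'
--         return 'background-color:grey'
--     return [color(e) for e in s]
-- ===== Notes on version B (the rewrite author's own statement) =====
-- stated objective: simpler
-- what changed: B proves four of A's nine branches dead (' SUPERSOFT'/' ULTRASOFT'/' HYPERSOFT' contain 'SOFT' and ' SUPERHARD' contains 'HARD', so an earlier branch always fires) and keeps only the five live keywords in an early-return helper mapped over the list, instead of A's accumulator loop over a 10-way cascade.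
import Mathlib
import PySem

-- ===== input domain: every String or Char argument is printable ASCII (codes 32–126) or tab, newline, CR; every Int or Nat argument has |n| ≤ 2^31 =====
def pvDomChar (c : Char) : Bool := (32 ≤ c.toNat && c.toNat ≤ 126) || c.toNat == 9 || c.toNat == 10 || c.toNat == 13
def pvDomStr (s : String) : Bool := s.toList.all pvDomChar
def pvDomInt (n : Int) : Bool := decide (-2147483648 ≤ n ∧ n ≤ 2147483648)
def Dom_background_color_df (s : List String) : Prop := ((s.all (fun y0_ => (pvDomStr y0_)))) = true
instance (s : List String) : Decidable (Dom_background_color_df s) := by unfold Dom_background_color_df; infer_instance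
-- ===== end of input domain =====

-- B removes four branches of A's cascade that are provably unreachable (their patterns contain an
-- earlier pattern) and maps a five-way early-return helper over the list: simpler, same cost.


-- ===== PORT A =====
-- literal port of A: accumulator loop with a 10-way if/elif cascade per element
def background_color_df (s : List String) : List String :=
  s.foldl (fun colors time_and_compound =>
    if PySem.Str.isIn "SOFT" time_and_compound then colors ++ ["background-color:red"]
    else if PySem.Str.isIn "MEDIUM" time_and_compound then colors ++ ["background-color:yellow"]
    else if PySem.Str.isIn "HARD" time_and_compound then colors ++ ["background-color:white"]
    else if PySem.Str.isIn "INTERMEDIATE" time_and_compound then colors ++ ["background-color:green"]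
    else if PySem.Str.isIn "WET" time_and_compound then colors ++ ["background-color:blue"]
    else if PySem.Str.isIn " SUPERSOFT" time_and_compound then colors ++ ["background-color:purple"]
    else if PySem.Str.isIn " ULTRASOFT" time_and_compound then colors ++ ["background-color:orangered"]
    else if PySem.Str.isIn " HYPERSOFT" time_and_compound then colors ++ ["background-color:pink"]
    else if PySem.Str.isIn " SUPERHARD" time_and_compound then colors ++ ["background-color:orange"]
    else colors ++ ["background-color:grey"]) []

-- ===== PORT B =====
-- B's early-return helper: only the five live keywords
def pvColor (e : String) : String :=
  if PySem.Str.isIn "SOFT" e then "background-color:red"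
  else if PySem.Str.isIn "MEDIUM" e then "background-color:yellow"
  else if PySem.Str.isIn "HARD" e then "background-color:white"
  else if PySem.Str.isIn "INTERMEDIATE" e then "background-color:green"
  else if PySem.Str.isIn "WET" e then "background-color:blue"
  else "background-color:grey"

def background_color_df_alt (s : List String) : List String := s.map pvColor

-- ===== PRECONDITION & SPEC =====
def Spec_background_color_df (s : List String) (out : List String) : Prop := out = background_color_df_alt s
instance (s : List String) (out : List String) : Decidable (Spec_background_color_df s out) := by unfold Spec_background_color_df; infer_instance

-- ===== CLAIM (what is proved, stated in full; the proofs are below) =====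
def Claim_equal_background_color_df : Prop := ∀ (s : List String), Dom_background_color_df s → Spec_background_color_df s (background_color_df s)

-- ===== LEMMAS AND PROOFS =====
-- if a pattern q contains pattern p, then 'q in t' implies 'p in t'
theorem pv_isIn_mono (p q t : String) (h : p.toList <:+: q.toList)
    (hq : PySem.Str.isIn q t = true) : PySem.Str.isIn p t = true := by
  rw [PySem.Str.isIn_iff_infix] at hq ⊢
  exact h.trans hq

-- per element: A's 10-way cascade equals B's 5-way helper
theorem pv_elem (t : String) :
    (if PySem.Str.isIn "SOFT" t then "background-color:red"
     else if PySem.Str.isIn "MEDIUM" t then "background-color:yellow"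
     else if PySem.Str.isIn "HARD" t then "background-color:white"
     else if PySem.Str.isIn "INTERMEDIATE" t then "background-color:green"
     else if PySem.Str.isIn "WET" t then "background-color:blue"
     else if PySem.Str.isIn " SUPERSOFT" t then "background-color:purple"
     else if PySem.Str.isIn " ULTRASOFT" t then "background-color:orangered"
     else if PySem.Str.isIn " HYPERSOFT" t then "background-color:pink"
     else if PySem.Str.isIn " SUPERHARD" t then "background-color:orange"
     else "background-color:grey") = pvColor t := by
  unfold pvColor
  by_cases h1 : PySem.Str.isIn "SOFT" t = true
  · simp_all
  · have hss : PySem.Str.isIn " SUPERSOFT" t = false := by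
      cases hc : PySem.Str.isIn " SUPERSOFT" t
      · rfl
      · exact absurd (pv_isIn_mono "SOFT" " SUPERSOFT" t (by decide) hc) h1
    have hus : PySem.Str.isIn " ULTRASOFT" t = false := by
      cases hc : PySem.Str.isIn " ULTRASOFT" t
      · rfl
      · exact absurd (pv_isIn_mono "SOFT" " ULTRASOFT" t (by decide) hc) h1
    have hhs : PySem.Str.isIn " HYPERSOFT" t = false := by
      cases hc : PySem.Str.isIn " HYPERSOFT" t
      · rfl
      · exact absurd (pv_isIn_mono "SOFT" " HYPERSOFT" t (by decide) hc) h1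
    by_cases h3 : PySem.Str.isIn "HARD" t = true
    · simp_all
    · have hsh : PySem.Str.isIn " SUPERHARD" t = false := by
        cases hc : PySem.Str.isIn " SUPERHARD" t
        · rfl
        · exact absurd (pv_isIn_mono "HARD" " SUPERHARD" t (by decide) hc) h3
      simp_all
      rfl

-- loop invariant: A's fold from acc equals acc ++ B's map
theorem pv_foldl_eq (s : List String) (acc : List String) :
    s.foldl (fun colors time_and_compound =>
      if PySem.Str.isIn "SOFT" time_and_compound then colors ++ ["background-color:red"]
      else if PySem.Str.isIn "MEDIUM" time_and_compound then colors ++ ["background-color:yellow"]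
      else if PySem.Str.isIn "HARD" time_and_compound then colors ++ ["background-color:white"]
      else if PySem.Str.isIn "INTERMEDIATE" time_and_compound then colors ++ ["background-color:green"]
      else if PySem.Str.isIn "WET" time_and_compound then colors ++ ["background-color:blue"]
      else if PySem.Str.isIn " SUPERSOFT" time_and_compound then colors ++ ["background-color:purple"]
      else if PySem.Str.isIn " ULTRASOFT" time_and_compound then colors ++ ["background-color:orangered"]
      else if PySem.Str.isIn " HYPERSOFT" time_and_compound then colors ++ ["background-color:pink"]
      else if PySem.Str.isIn " SUPERHARD" time_and_compound then colors ++ ["background-color:orange"]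
      else colors ++ ["background-color:grey"]) acc
    = acc ++ s.map pvColor := by
  induction s generalizing acc with
  | nil => simp
  | cons h t ih =>
    have hstep : ∀ (colors : List String),
        (if PySem.Str.isIn "SOFT" h then colors ++ ["background-color:red"]
         else if PySem.Str.isIn "MEDIUM" h then colors ++ ["background-color:yellow"]
         else if PySem.Str.isIn "HARD" h then colors ++ ["background-color:white"]
         else if PySem.Str.isIn "INTERMEDIATE" h then colors ++ ["background-color:green"]
         else if PySem.Str.isIn "WET" h then colors ++ ["background-color:blue"]
         else if PySem.Str.isIn " SUPERSOFT" h then colors ++ ["background-color:purple"]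
         else if PySem.Str.isIn " ULTRASOFT" h then colors ++ ["background-color:orangered"]
         else if PySem.Str.isIn " HYPERSOFT" h then colors ++ ["background-color:pink"]
         else if PySem.Str.isIn " SUPERHARD" h then colors ++ ["background-color:orange"]
         else colors ++ ["background-color:grey"]) = colors ++ [pvColor h] := by
      intro colors
      rw [← pv_elem h]
      split_ifs <;> rfl
    simp only [List.foldl_cons, List.map_cons]
    rw [hstep, ih, List.append_assoc, List.singleton_append]

-- ===== VERDICT (by name: the statement is the Claim_ definition above) =====
theorem background_color_df_spec : Claim_equal_background_color_df := by
  intro s _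
  unfold Spec_background_color_df background_color_df background_color_df_alt
  simpa using pv_foldl_eq s []
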